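-- pv_equiv track=rewrite | github.com/mercutioviz/ftap | scripts/utils.py | group_by_status_code
-- ===== SOURCE A (Python) =====
-- from typing import List, Dict, Any, Optional, Union, Tuple
--
-- def group_by_status_code(results: List[Dict]) -> Dict[int, List[Dict]]:
--     """Group results by status code
--
--     Args:
--         results: List of result dictionaries
--
--     Returns:
--         Dictionary with status codes as keys and lists of results as values
--     """
--     grouped = {}
--
--     for result in results:
--         status_code = result.get('status_code', 0)
--         if status_code not in grouped:
--             grouped[status_code] = []
--         grouped[status_code].append(result)
--
--     return grouped
-- ===== SOURCE B (Python) =====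
-- def group_by_status_code(results):
--     """Group results by status code: collect the distinct status codes in
--     first-occurrence order, then build each bucket with one filter pass."""
--     keys = list(dict.fromkeys(r.get('status_code', 0) for r in results))
--     return {k: [r for r in results if r.get('status_code', 0) == k] for k in keys}
-- ===== Notes on version B (the rewrite author's own statement) =====
-- stated objective: alternative
-- what changed: Replaces A's incremental hash-bucketing loop (create-bucket-if-missing, then append) with a dedup of the key sequence followed by one filter pass per distinct status code; no dict is mutated while scanning.
import Mathlib
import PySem

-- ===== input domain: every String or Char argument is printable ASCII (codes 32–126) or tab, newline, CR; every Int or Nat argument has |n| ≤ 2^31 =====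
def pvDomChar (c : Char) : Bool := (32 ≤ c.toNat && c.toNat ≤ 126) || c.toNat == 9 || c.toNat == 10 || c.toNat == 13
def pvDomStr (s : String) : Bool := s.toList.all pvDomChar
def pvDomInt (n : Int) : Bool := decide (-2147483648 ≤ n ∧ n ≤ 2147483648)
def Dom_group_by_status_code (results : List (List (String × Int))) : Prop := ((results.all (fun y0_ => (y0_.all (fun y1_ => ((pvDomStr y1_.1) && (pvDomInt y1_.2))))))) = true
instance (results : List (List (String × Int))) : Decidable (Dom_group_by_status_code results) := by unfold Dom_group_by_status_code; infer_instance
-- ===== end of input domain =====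

-- B keeps A's first-occurrence key order but builds each bucket with a filter pass instead of mutating a dict; same return value.

-- shared input decoding: result.get('status_code', 0) on the dict the assoc list denotes
def keyOf (r : List (String × Int)) : Int := (PySem.Dict.ofList r).getD "status_code" 0

-- ===== PORT A =====
def gbsStep (g : PySem.Dict Int (List (List (String × Int)))) (r : List (String × Int)) :
    PySem.Dict Int (List (List (String × Int))) :=
  let sc := keyOf r
  let g' := if g.contains sc then g else g.insert sc []
  g'.modify sc [] (fun l => l ++ [r])

def group_by_status_code (results : List (List (String × Int))) : List (Int × List (List (String × Int))) :=
  (results.foldl gbsStep PySem.Dict.empty).items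

-- ===== PORT B =====
def group_by_status_code_alt (results : List (List (String × Int))) : List (Int × List (List (String × Int))) :=
  let keys := PySem.List.dedup (results.map keyOf)
  keys.map (fun k => (k, results.filter (fun r => keyOf r == k)))

-- ===== PRECONDITION & SPEC =====
def Spec_group_by_status_code (results : List (List (String × Int))) (out : List (Int × List (List (String × Int)))) : Prop := out = group_by_status_code_alt results
instance (results : List (List (String × Int))) (out : List (Int × List (List (String × Int)))) : Decidable (Spec_group_by_status_code results out) := by unfold Spec_group_by_status_code; infer_instance

-- ===== CLAIM (what is proved, stated in full; the proofs are below) =====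
def Claim_equal_group_by_status_code : Prop := ∀ (results : List (List (String × Int))), Dom_group_by_status_code results → Spec_group_by_status_code results (group_by_status_code results)

-- ===== LEMMAS AND PROOFS =====

lemma keys_gbsStep (g : PySem.Dict Int (List (List (String × Int)))) (r : List (String × Int)) :
    (gbsStep g r).keys = PySem.Set.add g.keys (keyOf r) := by
  unfold gbsStep
  rw [PySem.Set.add_eq_ite]
  cases hb : g.contains (keyOf r) with
  | true =>
      have hm : keyOf r ∈ g.keys := (PySem.Dict.contains_iff_mem_keys g (keyOf r)).mp hb
      simp only [hb, if_true, PySem.Dict.keys_modify, if_pos hm,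
        PySem.Dict.keys_insert_of_contains g _ hb]
  | false =>
      have hm : keyOf r ∉ g.keys := fun hx => by
        simp [(PySem.Dict.contains_iff_mem_keys g (keyOf r)).mpr hx] at hb
      simp only [hb, Bool.false_eq_true, if_false, PySem.Dict.keys_modify,
        PySem.Dict.insert_insert_self, if_neg hm,
        PySem.Dict.keys_insert_of_not_contains g _ hb]

lemma keys_gbsLoop (l : List (List (String × Int))) :
    ∀ g : PySem.Dict Int (List (List (String × Int))),
      (l.foldl gbsStep g).keys = PySem.Set.update g.keys (l.map keyOf) := by
  induction l with
  | nil => intro g; simp [PySem.Set.update_nil]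
  | cons r l ih =>
      intro g
      simp only [List.foldl_cons, List.map_cons, PySem.Set.update_cons]
      rw [ih, keys_gbsStep]

lemma getD_gbsStep (g : PySem.Dict Int (List (List (String × Int)))) (r : List (String × Int)) (c : Int) :
    (gbsStep g r).getD c [] = if c = keyOf r then g.getD c [] ++ [r] else g.getD c [] := by
  unfold gbsStep
  rw [PySem.Dict.getD_modify]
  cases hb : g.contains (keyOf r) with
  | true => by_cases hc : c = keyOf r <;> simp [hc]
  | false =>
      by_cases hc : c = keyOf r
      · subst hc
        simp [PySem.Dict.getD_insert_self,
          PySem.Dict.getD_of_not_contains g ([] : List (List (String × Int))) hb]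
      · simp [hc, PySem.Dict.getD_insert_of_ne g ([] : List (List (String × Int))) [] hc]

lemma getD_gbsLoop (l : List (List (String × Int))) :
    ∀ (g : PySem.Dict Int (List (List (String × Int)))) (c : Int),
      (l.foldl gbsStep g).getD c [] = g.getD c [] ++ l.filter (fun r => keyOf r == c) := by
  induction l with
  | nil => intro g c; simp
  | cons r l ih =>
      intro g c
      simp only [List.foldl_cons]
      rw [ih, getD_gbsStep]
      by_cases hc : c = keyOf r
      · simp [hc.symm]
      · have : (keyOf r == c) = false := by simp [Ne.symm hc]
        simp [this, hc]

lemma nodup_keys_gbsLoop (l : List (List (String × Int))) :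
    (l.foldl gbsStep PySem.Dict.empty).keys.Nodup := by
  rw [keys_gbsLoop]
  exact PySem.Set.nodup_update _ _ (by simp [PySem.Dict.keys_empty])

-- ===== VERDICT (by name: the statement is the Claim_ definition above) =====
theorem group_by_status_code_spec : Claim_equal_group_by_status_code := by
  intro results _
  show group_by_status_code results = group_by_status_code_alt results
  unfold group_by_status_code group_by_status_code_alt
  rw [PySem.Dict.items_eq_map_keys _ (nodup_keys_gbsLoop results) []]
  rw [keys_gbsLoop]
  simp only [PySem.Dict.keys_empty, PySem.Set.update_nil_left, PySem.List.dedup_eq_ofList]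
  refine List.map_congr_left ?_
  intro k _
  rw [getD_gbsLoop]
  simp
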